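-- pv_equiv track=rewrite | github.com/a1852rw/aiit_001_system_programing | exam_001/q003_sum7.py | sum7
-- ===== SOURCE A (Python) =====
-- def sum7(numbers):
--     sum = 0
--     i = 0
--     double = False
--     n = len(numbers)
--     if n == 0: return -1
--     while i < n:
--         sum += numbers[i]
--         if double:
--             sum += numbers[i]
--             double = False
--         if numbers[i] == 7: double = True
--         i += 1
--     return sum
-- ===== SOURCE B (Python) =====
-- def sum7(numbers):
--     if len(numbers) == 0:
--         return -1
--     total = sum(numbers)
--     for prev, cur in zip(numbers, numbers[1:]):
--         if prev == 7:
--             total += cur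
--     return total
-- ===== Notes on version B (the rewrite author's own statement) =====
-- stated objective: simpler
-- what changed: Replaces the single index loop carrying a 'double' flag with a plain sum(numbers) plus a separate adjacent-pair pass adding each element that follows a 7.
import Mathlib
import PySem

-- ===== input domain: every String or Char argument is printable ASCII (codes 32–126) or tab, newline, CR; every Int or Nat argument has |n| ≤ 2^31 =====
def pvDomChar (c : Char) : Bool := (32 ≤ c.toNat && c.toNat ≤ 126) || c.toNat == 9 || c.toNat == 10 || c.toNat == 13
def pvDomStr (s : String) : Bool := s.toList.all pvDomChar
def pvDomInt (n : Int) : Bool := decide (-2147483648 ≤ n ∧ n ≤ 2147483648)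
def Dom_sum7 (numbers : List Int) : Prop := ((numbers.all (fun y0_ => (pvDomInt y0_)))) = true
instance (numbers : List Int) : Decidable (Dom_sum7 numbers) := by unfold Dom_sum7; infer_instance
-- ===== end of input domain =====

-- B differs only in decomposition: a plain sum plus a separate adjacent-pair bonus pass.

-- ===== PORT A =====
-- the while loop over the remaining elements, carrying (sum, double) exactly as A does
def sum7Loop (rest : List Int) (s : Int) (double : Bool) : Int :=
  match rest with
  | [] => s
  | x :: t =>
    let s := s + x
    let (s, double) := if double then (s + x, false) else (s, double)
    let double := if x == 7 then true else double
    sum7Loop t s double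

def sum7 (numbers : List Int) : Int :=
  if numbers.length == 0 then -1 else sum7Loop numbers 0 false

-- ===== PORT B =====
-- bonus pass over zip numbers numbers[1:]
def sum7Bonus (pairs : List (Int × Int)) (total : Int) : Int :=
  match pairs with
  | [] => total
  | (p, c) :: t => sum7Bonus t (if p == 7 then total + c else total)

def sum7_alt (numbers : List Int) : Int :=
  if numbers.length == 0 then -1
  else sum7Bonus (numbers.zip (PySem.List.slice numbers (some 1) none)) numbers.sum

-- ===== PRECONDITION & SPEC =====
def Spec_sum7 (numbers : List Int) (out : Int) : Prop := out = sum7_alt numbers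
instance (numbers : List Int) (out : Int) : Decidable (Spec_sum7 numbers out) := by unfold Spec_sum7; infer_instance

-- ===== CLAIM (what is proved, stated in full; the proofs are below) =====
def Claim_equal_sum7 : Prop := ∀ (numbers : List Int), Dom_sum7 numbers → Spec_sum7 numbers (sum7 numbers)

-- ===== LEMMAS AND PROOFS =====

-- functional characterisations of both loops
def bonusVal : List Int → Int
  | a :: b :: t => (if a = 7 then b else 0) + bonusVal (b :: t)
  | _ => 0

theorem sum7Bonus_eq (pairs : List (Int × Int)) (t : Int) :
    sum7Bonus pairs t = t + (pairs.map (fun pc => if pc.1 = 7 then pc.2 else 0)).sum := by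
  induction pairs generalizing t with
  | nil => simp [sum7Bonus]
  | cons pc rest ih =>
    obtain ⟨p, c⟩ := pc
    simp only [sum7Bonus, List.map, List.sum_cons, beq_iff_eq]
    rw [ih]
    split_ifs <;> ring

theorem zip_map_bonus (xs : List Int) :
    ((xs.zip xs.tail).map (fun pc => if pc.1 = 7 then pc.2 else 0)).sum = bonusVal xs := by
  induction xs with
  | nil => simp [bonusVal]
  | cons a t ih =>
    cases t with
    | nil => simp [bonusVal]
    | cons b r =>
      simp only [List.tail_cons, List.zip_cons_cons, List.map, List.sum_cons, bonusVal]
      rw [← ih]; simp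

theorem sum7Loop_eq (xs : List Int) (s : Int) (d : Bool) :
    sum7Loop xs s d = s + xs.sum + (if d then xs.headI else 0) + bonusVal xs := by
  induction xs generalizing s d with
  | nil => simp [sum7Loop, bonusVal]
  | cons x t ih =>
    simp only [sum7Loop]
    cases t with
    | nil =>
      cases d <;> by_cases hx : x = 7 <;> simp [hx, sum7Loop, bonusVal] <;> ring
    | cons b r =>
      rw [show bonusVal (x :: b :: r) = (if x = 7 then b else 0) + bonusVal (b :: r) from rfl]
      cases d <;> by_cases hx : x = 7 <;>
        simp [hx, ih, List.headI] <;> ring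


-- ===== VERDICT (by name: the statement is the Claim_ definition above) =====
theorem sum7_spec : Claim_equal_sum7 := by
  intro numbers _
  unfold Spec_sum7 sum7 sum7_alt
  by_cases h : numbers.length == 0
  · simp [h]
  · simp only [h, Bool.false_eq_true, if_false]
    rw [PySem.List.slice_from_one, sum7Bonus_eq, zip_map_bonus, sum7Loop_eq]
    simp
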